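-- pv_equiv track=rewrite | github.com/yhsol/algorithm_study | book/python_algorithm_interview/Q/21.py | no_duplicated
-- ===== SOURCE A (Python) =====
-- def no_duplicated(s: str) -> str:
--     formatted = []
--     for item in s:
--         if item in formatted:
--             formatted.pop(formatted.index(item))
--         else:
--             formatted.append(item)
--     return sorted(formatted)
-- ===== SOURCE B (Python) =====
-- def no_duplicated(s: str) -> str:
--     counts = {}
--     for ch in s:
--         counts[ch] = counts.get(ch, 0) + 1
--     return sorted(c for c, n in counts.items() if n % 2)
-- ===== Notes on version B (the rewrite author's own statement) =====
-- stated objective: simpler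
-- what changed: Replaces the toggle-list scan (membership test plus index/pop inside the loop) by a count-first decomposition: build a character frequency dict in one pass, then keep the characters with odd count and sort them.
import Mathlib
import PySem

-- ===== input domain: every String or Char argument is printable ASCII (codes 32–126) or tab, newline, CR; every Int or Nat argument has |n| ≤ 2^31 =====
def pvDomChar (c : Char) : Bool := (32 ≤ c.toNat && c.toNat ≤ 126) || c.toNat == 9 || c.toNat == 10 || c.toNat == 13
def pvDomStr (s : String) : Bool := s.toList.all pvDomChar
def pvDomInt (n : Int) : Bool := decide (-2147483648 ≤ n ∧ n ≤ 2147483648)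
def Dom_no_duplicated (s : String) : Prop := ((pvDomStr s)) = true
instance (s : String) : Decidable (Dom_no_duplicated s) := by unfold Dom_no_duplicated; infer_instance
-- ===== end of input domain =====

-- B replaces A's toggle list (membership test + index/pop per character) by a one-pass
-- frequency dict followed by an odd-count filter over its items; same sorted result.

-- ===== PORT A =====
-- one step of A's loop body: if item in formatted: formatted.pop(formatted.index(item)) else: formatted.append(item)
def noDupStep (formatted : List Char) (item : Char) : List Char :=
  if item ∈ formatted then
    match PySem.List.index? formatted item with
    | some i =>
      match PySem.List.pop? formatted (i : Int) with
      | some (_, rest) => rest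
      | none => formatted     -- unreachable: index? returns a valid index
    | none => formatted       -- unreachable: item ∈ formatted
  else formatted ++ [item]

def no_duplicated (s : String) : List String :=
  let formatted := s.toList.foldl noDupStep []
  PySem.List.sorted (formatted.map (fun c => String.mk [c])) (fun x => x) false

-- ===== PORT B =====
def no_duplicated_alt (s : String) : List String :=
  let counts : PySem.Dict Char Int :=
    s.toList.foldl (fun d ch => d.insert ch (d.getD ch 0 + 1)) PySem.Dict.empty
  PySem.List.sorted
    ((counts.items.filter (fun p => PySem.Int.mod p.2 2 != 0)).map (fun p => String.mk [p.1]))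
    (fun x => x) false

-- ===== PRECONDITION & SPEC =====
def Spec_no_duplicated (s : String) (out : List String) : Prop := out = no_duplicated_alt s
instance (s : String) (out : List String) : Decidable (Spec_no_duplicated s out) := by unfold Spec_no_duplicated; infer_instance

-- ===== CLAIM (what is proved, stated in full; the proofs are below) =====
def Claim_equal_no_duplicated : Prop := ∀ (s : String), Dom_no_duplicated s → Spec_no_duplicated s (no_duplicated s)

-- ===== LEMMAS AND PROOFS =====

theorem idxOf_of_idxOf? (l : List Char) (a : Char) (k : Nat) (h : l.idxOf? a = some k) :
    l.idxOf a = k := by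
  induction l generalizing k with
  | nil => simp [List.idxOf?] at h
  | cons x xs ih =>
    by_cases hx : x = a
    · subst hx; simp_all [List.idxOf?_cons]
    · simp_all [List.idxOf?_cons, Option.map_eq_some_iff, beq_iff_eq]
      obtain ⟨k', hk', rfl⟩ := h
      simp [ih _ hk']

-- A's pop(index(item)) on a list containing item is first-occurrence erase
theorem noDupStep_eq (formatted : List Char) (item : Char) :
    noDupStep formatted item =
      if item ∈ formatted then formatted.erase item else formatted ++ [item] := by
  unfold noDupStep
  by_cases h : item ∈ formatted
  · simp only [h, if_true]
    obtain ⟨k, hk⟩ := Option.isSome_iff_exists.mp ((PySem.List.index?_isSome_iff _ _).mpr h)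
    obtain ⟨hklen, -, -⟩ := PySem.List.getElem_of_index?_eq_some hk
    rw [hk]
    dsimp only
    have hk' : List.idxOf? item formatted = some k := by
      rw [← PySem.List.index?_eq_idxOf?]; exact hk
    rw [PySem.List.pop?_natCast _ _ hklen,
        List.erase_eq_eraseIdx_of_idxOf (idxOf_of_idxOf? _ _ _ hk')]
  · simp [h]

-- invariant of A's toggle loop: the accumulator stays duplicate-free, and a character
-- is in it iff its count in the processed prefix (plus its presence in the start state) is odd
theorem toggle_invariant (l acc : List Char) (hacc : acc.Nodup) :
    (l.foldl noDupStep acc).Nodup ∧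
    ∀ c, c ∈ l.foldl noDupStep acc ↔ (l.count c + (if c ∈ acc then 1 else 0)) % 2 = 1 := by
  induction l generalizing acc with
  | nil =>
    refine ⟨hacc, fun c => ?_⟩
    by_cases h : c ∈ acc <;> simp [h]
  | cons a l ih =>
    have hstep := noDupStep_eq acc a
    have hnd : (noDupStep acc a).Nodup := by
      rw [hstep]; split_ifs with h
      · exact hacc.erase a
      · simp [List.nodup_append, hacc]
        intro x hx hxa
        exact h (hxa ▸ hx)
    obtain ⟨h1, h2⟩ := ih (noDupStep acc a) hnd
    refine ⟨h1, fun c => ?_⟩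
    simp only [List.foldl_cons]
    rw [h2 c]
    by_cases hca : c = a
    · subst hca
      have hm : (c ∈ noDupStep acc c) ↔ ¬ c ∈ acc := by
        rw [hstep]; split_ifs with h
        · simp [h, hacc.not_mem_erase]
        · simp [h]
      simp only [hm, List.count_cons_self]
      by_cases h : c ∈ acc <;> simp [h] <;> omega
    · have hm : (c ∈ noDupStep acc a) ↔ c ∈ acc := by
        rw [hstep]; split_ifs with h
        · exact List.mem_erase_of_ne hca
        · simp [hca]
      simp [hm, Ne.symm hca]

-- ===== VERDICT (by name: the statement is the Claim_ definition above) =====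
theorem no_duplicated_spec : Claim_equal_no_duplicated := by
  intro s _
  unfold Spec_no_duplicated no_duplicated no_duplicated_alt
  simp only [PySem.Dict.foldl_insert_getD_add_one_eq_counter, PySem.Dict.items_counter,
      List.filter_map, List.map_map]
  set l := s.toList
  have hpred : ∀ k : Char,
      ((fun p : Char × Int => PySem.Int.mod p.2 2 != 0) ∘ (fun k => (k, (l.count k : Int)))) k
        = decide (l.count k % 2 = 1) := by
    intro k
    have : PySem.Int.mod (l.count k : Int) 2 = ((l.count k % 2 : Nat) : Int) := by
      exact_mod_cast PySem.Int.mod_natCast (l.count k) 2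
    simp only [Function.comp, this]
    by_cases h : l.count k % 2 = 1 <;> simp [h] <;> omega
  rw [List.filter_congr (fun k _ => hpred k)]
  obtain ⟨hnd, hmem⟩ := toggle_invariant l [] List.nodup_nil
  have hperm : (l.foldl noDupStep []).Perm
      ((PySem.Set.ofList l).filter (fun k => decide (l.count k % 2 = 1))) := by
    rw [List.perm_ext_iff_of_nodup hnd ((PySem.Set.nodup_ofList l).filter _)]
    intro c
    simp only [hmem c, List.mem_filter, PySem.Set.mem_ofList, decide_eq_true_eq,
      List.not_mem_nil, if_false, Nat.add_zero]
    constructor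
    · intro h
      have hc : 0 < l.count c := by omega
      exact ⟨List.count_pos_iff.mp hc, by omega⟩
    · intro ⟨_, h⟩; omega
  exact PySem.List.sorted_eq_sorted_of_perm _ _ (fun x => x) (fun _ _ h => h) (hperm.map _)
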